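-- pv_equiv track=rewrite | github.com/Leow92/orikta.scouting | tools/analyze_2.py | _prefer_stats_standard_key
-- ===== SOURCE A (Python) =====
-- from typing import Iterable, Optional
--
-- def _prefer_stats_standard_key(keys: Iterable[str]) -> Optional[str]:
--     """
--     Choose the most useful stats_standard* table if multiple exist.
--     Preference order: domestic league -> league -> generic -> all comps -> fallback.
--     """
--     keys = list(keys)
--     if not keys:
--         return None
--     priority = [
--         "stats_standard_dom_lg",
--         "stats_standard_lg",
--         "stats_standard",
--         "stats_standard_all",
--     ]
--     for pref in priority:
--         if pref in keys:
--             return pref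
--     return keys[0]
-- ===== SOURCE B (Python) =====
-- from typing import Iterable, Optional
--
-- def _prefer_stats_standard_key(keys: Iterable[str]) -> Optional[str]:
--     """
--     Choose the most useful stats_standard* table if multiple exist.
--     Single pass over the actual keys with a rank table, tracking the
--     smallest-rank priority key seen; falls back to keys[0].
--     """
--     keys = list(keys)
--     if not keys:
--         return None
--     rank = {
--         "stats_standard_dom_lg": 0,
--         "stats_standard_lg": 1,
--         "stats_standard": 2,
--         "stats_standard_all": 3,
--     }
--     best = None  # (rank, key)
--     for k in keys:
--         r = rank.get(k)
--         if r is not None and (best is None or r < best[0]):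
--             best = (r, k)
--     return best[1] if best is not None else keys[0]
-- ===== Notes on version B (the rewrite author's own statement) =====
-- stated objective: alternative
-- what changed: Inverts the traversal: instead of scanning the fixed priority list and testing membership of each in keys (repeated O(n) scans), B makes one pass over the actual keys with a rank table, tracking the key of smallest rank, falling back to keys[0].
import Mathlib
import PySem

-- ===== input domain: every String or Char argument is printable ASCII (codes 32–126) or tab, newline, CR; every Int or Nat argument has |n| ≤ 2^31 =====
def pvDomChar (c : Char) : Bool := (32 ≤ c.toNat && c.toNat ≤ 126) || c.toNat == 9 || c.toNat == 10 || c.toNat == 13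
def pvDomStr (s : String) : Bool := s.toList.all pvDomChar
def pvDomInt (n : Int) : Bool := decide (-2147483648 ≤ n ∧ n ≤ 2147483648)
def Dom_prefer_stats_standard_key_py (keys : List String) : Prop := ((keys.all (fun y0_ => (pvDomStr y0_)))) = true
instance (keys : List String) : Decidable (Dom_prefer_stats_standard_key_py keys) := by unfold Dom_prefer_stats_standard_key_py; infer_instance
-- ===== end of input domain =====

-- B replaces A's scan of the fixed priority list (a membership test in keys per priority)
-- by a single pass over keys with a rank table, tracking the smallest-rank key seen (objective: alternative).

-- ===== PORT A =====
-- the fixed priority list of A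
def pvPriorityA : List String :=
  ["stats_standard_dom_lg", "stats_standard_lg", "stats_standard", "stats_standard_all"]

-- the 'for pref in priority: if pref in keys: return pref' loop, then 'return keys[0]'
def pvLoopA : List String → List String → Option String
  | [], keys => PySem.List.pyGet? keys 0
  | p :: ps, keys => if p ∈ keys then some p else pvLoopA ps keys

def prefer_stats_standard_key_py (keys : List String) : Option String :=
  if keys = [] then none
  else pvLoopA pvPriorityA keys

-- ===== PORT B =====
-- B's rank table
def pvRankB : PySem.Dict String Int :=
  PySem.Dict.ofList
    [("stats_standard_dom_lg", 0), ("stats_standard_lg", 1),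
     ("stats_standard", 2), ("stats_standard_all", 3)]

-- one iteration of B's loop: best is None or (rank, key)
def pvStepB (best : Option (Int × String)) (k : String) : Option (Int × String) :=
  match pvRankB.get? k with
  | none => best
  | some r =>
      match best with
      | none => some (r, k)
      | some (br, _) => if r < br then some (r, k) else best

def prefer_stats_standard_key_py_alt (keys : List String) : Option String :=
  if keys = [] then none
  else
    match keys.foldl pvStepB none with
    | some (_, k) => some k
    | none => PySem.List.pyGet? keys 0

-- ===== PRECONDITION & SPEC =====
def Spec_prefer_stats_standard_key_py (keys : List String) (out : Option String) : Prop := out = prefer_stats_standard_key_py_alt keys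
instance (keys : List String) (out : Option String) : Decidable (Spec_prefer_stats_standard_key_py keys out) := by unfold Spec_prefer_stats_standard_key_py; infer_instance

-- ===== CLAIM (what is proved, stated in full; the proofs are below) =====
def Claim_equal_prefer_stats_standard_key_py : Prop := ∀ (keys : List String), Dom_prefer_stats_standard_key_py keys → Spec_prefer_stats_standard_key_py keys (prefer_stats_standard_key_py keys)

-- ===== LEMMAS AND PROOFS =====

-- the minimum-with-left-bias that pvStepB implements, lifted to Option
def pvMin2 (a b : Option (Int × String)) : Option (Int × String) :=
  match a, b with
  | a, none => a
  | none, b => b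
  | some (ra, ka), some (rb, kb) => if rb < ra then some (rb, kb) else some (ra, ka)

-- the best (rank, key) of a list, computed from the right
def pvBest : List String → Option (Int × String)
  | [] => none
  | k :: ks => pvMin2 (pvRankB.get? k |>.map (fun r => (r, k))) (pvBest ks)

theorem pvMin2_assoc (a b c : Option (Int × String)) :
    pvMin2 (pvMin2 a b) c = pvMin2 a (pvMin2 b c) := by
  rcases a with _ | ⟨ra, ka⟩ <;> rcases b with _ | ⟨rb, kb⟩ <;> rcases c with _ | ⟨rc, kc⟩ <;>
    simp only [pvMin2] <;> split_ifs <;> (try simp only [pvMin2, reduceCtorEq]) <;> (try split_ifs) <;>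
      first | rfl | omega

theorem pvStepB_eq_min2 (best : Option (Int × String)) (k : String) :
    pvStepB best k = pvMin2 best (pvRankB.get? k |>.map (fun r => (r, k))) := by
  unfold pvStepB pvMin2
  rcases pvRankB.get? k with _ | r <;> rcases best with _ | ⟨br, bk⟩ <;> simp

theorem foldl_stepB_eq (ks : List String) (acc : Option (Int × String)) :
    ks.foldl pvStepB acc = pvMin2 acc (pvBest ks) := by
  induction ks generalizing acc with
  | nil => cases acc <;> rfl
  | cons k ks ih =>
      simp only [List.foldl_cons, pvBest, ih, pvStepB_eq_min2, pvMin2_assoc]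

-- rank lookups on the four literal priority keys and on non-priority keys
theorem rank_get (k : String) :
    pvRankB.get? k =
      if k = "stats_standard_dom_lg" then some 0
      else if k = "stats_standard_lg" then some 1
      else if k = "stats_standard" then some 2
      else if k = "stats_standard_all" then some 3
      else none := by
  have h : pvRankB = PySem.Dict.mk
      [("stats_standard_dom_lg", 0), ("stats_standard_lg", 1),
       ("stats_standard", 2), ("stats_standard_all", 3)] := by decide
  rw [h]
  split_ifs with h0 h1 h2 h3
  · subst h0; decide
  · subst h1; decide
  · subst h2; decide
  · subst h3; decide
  · simp [PySem.Dict.get?_mk_cons, beq_iff_eq, Ne.symm h0, Ne.symm h1, Ne.symm h2, Ne.symm h3]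
    rfl

-- pvBest as A sees it: the first priority key present in ks, with its rank
theorem pvBest_chain (ks : List String) :
    pvBest ks =
      if "stats_standard_dom_lg" ∈ ks then some (0, "stats_standard_dom_lg")
      else if "stats_standard_lg" ∈ ks then some (1, "stats_standard_lg")
      else if "stats_standard" ∈ ks then some (2, "stats_standard")
      else if "stats_standard_all" ∈ ks then some (3, "stats_standard_all")
      else none := by
  induction ks with
  | nil => simp [pvBest]
  | cons k ks ih =>
      simp only [pvBest, ih, rank_get, List.mem_cons]
      by_cases h0 : k = "stats_standard_dom_lg" <;>
        by_cases h1 : k = "stats_standard_lg" <;>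
          by_cases h2 : k = "stats_standard" <;>
            by_cases h3 : k = "stats_standard_all" <;>
              simp_all <;> split_ifs <;> simp_all [pvMin2]

-- ===== VERDICT (by name: the statement is the Claim_ definition above) =====
theorem prefer_stats_standard_key_py_spec : Claim_equal_prefer_stats_standard_key_py := by
  intro keys _
  unfold Spec_prefer_stats_standard_key_py prefer_stats_standard_key_py prefer_stats_standard_key_py_alt
  by_cases hnil : keys = []
  · simp [hnil]
  · simp only [hnil, ite_false]
    rw [foldl_stepB_eq]
    have : pvMin2 none (pvBest keys) = pvBest keys := by cases pvBest keys <;> rfl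
    rw [this, pvBest_chain]
    unfold pvLoopA pvPriorityA
    split_ifs <;> simp_all [pvLoopA]
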